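-- pv_equiv track=rewrite | github.com/Velazquezadrian/dropshipping-assistant | products/services/scraper.py | _categorize_product
-- ===== SOURCE A (Python) =====
-- def _categorize_product(title: str) -> str:
--     """
--     Categoriza producto basado en el título
--     """
--     title_lower = title.lower()
--     if any(word in title_lower for word in ['phone', 'smartphone', 'earbuds', 'charger', 'cable']):
--         return 'Electronics'
--     elif any(word in title_lower for word in ['kitchen', 'home', 'lamp', 'led']):
--         return 'Home & Garden'
--     elif any(word in title_lower for word in ['fitness', 'sport', 'yoga', 'exercise']):
--         return 'Sports & Outdoors'
--     elif any(word in title_lower for word in ['car', 'auto', 'mount']):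
--         return 'Automotive'
--     elif any(word in title_lower for word in ['beauty', 'makeup', 'skin']):
--         return 'Beauty & Health'
--     else:
--         return 'Other'
-- ===== SOURCE B (Python) =====
-- CATEGORY_KEYWORDS = [
--     ('Electronics', ['phone', 'smartphone', 'earbuds', 'charger', 'cable']),
--     ('Home & Garden', ['kitchen', 'home', 'lamp', 'led']),
--     ('Sports & Outdoors', ['fitness', 'sport', 'yoga', 'exercise']),
--     ('Automotive', ['car', 'auto', 'mount']),
--     ('Beauty & Health', ['beauty', 'makeup', 'skin']),
-- ]
--
-- # Inverted index: keyword -> priority (the position of its category); keywords are distinct.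
-- KEYWORD_PRIORITY = {w: i for i, (_cat, words) in enumerate(CATEGORY_KEYWORDS) for w in words}
--
--
-- def _categorize_product(title: str) -> str:
--     t = title.lower()
--     best = len(CATEGORY_KEYWORDS)
--     for w, p in KEYWORD_PRIORITY.items():
--         if p < best and w in t:
--             best = p
--     return CATEGORY_KEYWORDS[best][0] if best < len(CATEGORY_KEYWORDS) else 'Other'
-- ===== Notes on version B (the rewrite author's own statement) =====
-- stated objective: alternative
-- what changed: Replaces the ordered first-match if/elif cascade with an inverted keyword->priority index scanned exhaustively while maintaining a running-minimum priority accumulator, then a single indexed lookup of the winning category.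
import Mathlib
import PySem

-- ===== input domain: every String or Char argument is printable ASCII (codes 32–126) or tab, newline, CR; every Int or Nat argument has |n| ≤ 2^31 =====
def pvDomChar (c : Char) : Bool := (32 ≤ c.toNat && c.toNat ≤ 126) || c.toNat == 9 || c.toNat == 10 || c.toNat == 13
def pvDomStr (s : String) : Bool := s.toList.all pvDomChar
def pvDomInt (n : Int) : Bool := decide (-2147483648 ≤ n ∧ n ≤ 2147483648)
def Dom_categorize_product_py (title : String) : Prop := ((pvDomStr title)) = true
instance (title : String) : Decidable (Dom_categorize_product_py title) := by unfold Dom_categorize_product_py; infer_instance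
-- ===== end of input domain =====

-- B replaces the if/elif cascade with an exhaustive running-minimum scan of an inverted
-- keyword→priority index (alternative decomposition, same cost).

-- ===== PORT A =====
def categorize_product_py (title : String) : String :=
  let title_lower := PySem.Str.lower title
  if (["phone", "smartphone", "earbuds", "charger", "cable"].any (fun word => PySem.Str.isIn word title_lower)) then
    "Electronics"
  else if (["kitchen", "home", "lamp", "led"].any (fun word => PySem.Str.isIn word title_lower)) then
    "Home & Garden"
  else if (["fitness", "sport", "yoga", "exercise"].any (fun word => PySem.Str.isIn word title_lower)) then
    "Sports & Outdoors"
  else if (["car", "auto", "mount"].any (fun word => PySem.Str.isIn word title_lower)) then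
    "Automotive"
  else if (["beauty", "makeup", "skin"].any (fun word => PySem.Str.isIn word title_lower)) then
    "Beauty & Health"
  else
    "Other"

-- ===== PORT B =====
def pvCategoryKeywords : List (String × List String) :=
  [("Electronics", ["phone", "smartphone", "earbuds", "charger", "cable"]),
   ("Home & Garden", ["kitchen", "home", "lamp", "led"]),
   ("Sports & Outdoors", ["fitness", "sport", "yoga", "exercise"]),
   ("Automotive", ["car", "auto", "mount"]),
   ("Beauty & Health", ["beauty", "makeup", "skin"])]

-- inverted index keyword → priority (dict comprehension; keywords are distinct, so the
-- association list in insertion order is exactly the dict)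
def pvKeywordPriority : List (String × Int) :=
  (PySem.List.enumerate pvCategoryKeywords).flatMap (fun ip => ip.2.2.map (fun w => (w, ip.1)))

def categorize_product_py_alt (title : String) : String :=
  let t := PySem.Str.lower title
  let best := pvKeywordPriority.foldl
    (fun best kv => if kv.2 < best ∧ PySem.Str.isIn kv.1 t then kv.2 else best)
    (pvCategoryKeywords.length : Int)
  if best < (pvCategoryKeywords.length : Int) then
    ((PySem.List.pyGet? pvCategoryKeywords best).map Prod.fst).getD "Other"  -- index always in range; getD only totalizes
  else "Other"

-- ===== PRECONDITION & SPEC =====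
def Spec_categorize_product_py (title : String) (out : String) : Prop := out = categorize_product_py_alt title
instance (title : String) (out : String) : Decidable (Spec_categorize_product_py title out) := by unfold Spec_categorize_product_py; infer_instance

-- ===== CLAIM (what is proved, stated in full; the proofs are below) =====
def Claim_equal_categorize_product_py : Prop := ∀ (title : String), Dom_categorize_product_py title → Spec_categorize_product_py title (categorize_product_py title)

-- ===== LEMMAS AND PROOFS =====

-- folding B's running-min step over one keyword group (all entries share priority p)
theorem pv_fold_group (t : String) (ws : List String) (p b : Int) :
    (ws.map (fun w => (w, p))).foldl
      (fun best kv => if kv.2 < best ∧ PySem.Str.isIn kv.1 t then kv.2 else best) b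
    = if (ws.any (fun w => PySem.Str.isIn w t)) ∧ p < b then p else b := by
  induction ws generalizing b with
  | nil => simp
  | cons w ws ih =>
    simp only [List.map_cons, List.foldl_cons, List.any_cons]
    rw [ih]
    by_cases h : PySem.Str.isIn w t = true
    · by_cases hp : p < b
      · have hacc : (if p < b ∧ PySem.Str.isIn w t = true then p else b) = p := if_pos ⟨hp, h⟩
        rw [hacc, if_neg (fun hc => absurd hc.2 (lt_irrefl p)), if_pos ⟨by simp only [Bool.or_eq_true]; exact Or.inl (by simpa using h), hp⟩]
      · have hacc : (if p < b ∧ PySem.Str.isIn w t = true then p else b) = b :=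
          if_neg (fun hc => hp hc.1)
        rw [hacc, if_neg (fun hc => hp hc.2), if_neg (fun hc => hp hc.2)]
    · have hacc : (if p < b ∧ PySem.Str.isIn w t = true then p else b) = b :=
        if_neg (fun hc => h hc.2)
      by_cases hp : p < b
      · rw [hacc]
        have h' : PySem.Chars.isIn w.toList t.toList = false := by simpa using h
        simp [h']
      · rw [hacc, if_neg (fun hc => hp hc.2), if_neg (fun hc => hp hc.2)]

theorem pv_flat_decomp :
    pvKeywordPriority =
      (["phone", "smartphone", "earbuds", "charger", "cable"].map (fun w => (w, (0:Int)))) ++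
      (["kitchen", "home", "lamp", "led"].map (fun w => (w, (1:Int)))) ++
      (["fitness", "sport", "yoga", "exercise"].map (fun w => (w, (2:Int)))) ++
      (["car", "auto", "mount"].map (fun w => (w, (3:Int)))) ++
      (["beauty", "makeup", "skin"].map (fun w => (w, (4:Int)))) := by
  decide

-- ===== VERDICT (by name: the statement is the Claim_ definition above) =====
theorem categorize_product_py_spec : Claim_equal_categorize_product_py := by
  intro title _
  unfold Spec_categorize_product_py categorize_product_py categorize_product_py_alt
  rw [pv_flat_decomp]
  simp only [List.foldl_append, pv_fold_group]
  generalize (["phone", "smartphone", "earbuds", "charger", "cable"].any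
      (fun word => PySem.Str.isIn word (PySem.Str.lower title))) = g0
  generalize (["kitchen", "home", "lamp", "led"].any
      (fun word => PySem.Str.isIn word (PySem.Str.lower title))) = g1
  generalize (["fitness", "sport", "yoga", "exercise"].any
      (fun word => PySem.Str.isIn word (PySem.Str.lower title))) = g2
  generalize (["car", "auto", "mount"].any
      (fun word => PySem.Str.isIn word (PySem.Str.lower title))) = g3
  generalize (["beauty", "makeup", "skin"].any
      (fun word => PySem.Str.isIn word (PySem.Str.lower title))) = g4
  revert g0 g1 g2 g3 g4
  decide
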